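-- pv_equiv track=rewrite | github.com/Unic-hou/CS61ASpring2018-notebook | cats/cats.py | sphinx_swap
-- ===== SOURCE A (Python) =====
-- def sphinx_swap(start, goal, limit):
--     """A diff function for autocorrect that determines how many letters
--     in START need to be substituted to create GOAL, then adds the difference in
--     their lengths.
--     """
--     # BEGIN PROBLEM 6
--     if limit < 0 or start == goal:
--         return 0
--     if not start or not goal:
--         return abs(len(goal) - len(start))
--     if start[0] == goal[0]:
--         return sphinx_swap(start[1:], goal[1:], limit)
--     else:
--         return 1 + sphinx_swap(start[1:], goal[1:], limit - 1)
-- ===== SOURCE B (Python) =====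
-- def sphinx_swap(start, goal, limit):
--     if limit < 0:
--         return 0
--     mismatches = sum(1 for a, b in zip(start, goal) if a != b)
--     if mismatches > limit:
--         return limit + 1
--     return mismatches + abs(len(start) - len(goal))
-- ===== Notes on version B (the rewrite author's own statement) =====
-- stated objective: simpler
-- what changed: Replaces A's budget-threaded character-by-character recursion (with string slicing per step) with a single aggregate mismatch count over zip(start, goal) plus a closed-form cutoff (limit+1) / length-difference formula.
import Mathlib
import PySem

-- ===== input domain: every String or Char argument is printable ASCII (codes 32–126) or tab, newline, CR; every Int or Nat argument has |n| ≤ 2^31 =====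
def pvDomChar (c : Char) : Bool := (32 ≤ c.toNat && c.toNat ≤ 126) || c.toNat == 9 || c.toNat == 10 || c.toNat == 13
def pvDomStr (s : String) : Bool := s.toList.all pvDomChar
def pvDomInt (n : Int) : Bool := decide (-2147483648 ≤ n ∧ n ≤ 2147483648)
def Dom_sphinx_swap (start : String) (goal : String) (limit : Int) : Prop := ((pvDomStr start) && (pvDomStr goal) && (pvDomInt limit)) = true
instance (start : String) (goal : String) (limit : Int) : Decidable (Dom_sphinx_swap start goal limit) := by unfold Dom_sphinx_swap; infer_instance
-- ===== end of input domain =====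

-- B replaces A's budget-threaded recursive peel with one aggregate mismatch count and a
-- closed-form cutoff/length-difference formula (objective: simpler).


-- ===== PORT A =====
-- A's recursion, on the character lists of the two strings (start[1:] = tail).
def sphinxAux (s g : List Char) (limit : Int) : Int :=
  if limit < 0 ∨ s = g then 0
  else
    match s, g with
    | [], _ => |((g.length : Int) - (s.length : Int))|
    | _, [] => |((g.length : Int) - (s.length : Int))|
    | a :: s', b :: g' =>
      if a = b then sphinxAux s' g' limit
      else 1 + sphinxAux s' g' (limit - 1)

def sphinx_swap (start : String) (goal : String) (limit : Int) : Int :=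
  sphinxAux start.toList goal.toList limit

-- ===== PORT B =====
-- mismatches = sum(1 for a,b in zip(start,goal) if a != b)
def sphinxMismatches (s g : List Char) : Int :=
  (((s.zip g).filter (fun p => p.1 ≠ p.2)).length : Int)

def sphinx_swap_alt (start : String) (goal : String) (limit : Int) : Int :=
  if limit < 0 then 0
  else
    let m := sphinxMismatches start.toList goal.toList
    if m > limit then limit + 1
    else m + |((start.toList.length : Int) - (goal.toList.length : Int))|

-- ===== PRECONDITION & SPEC =====
def Spec_sphinx_swap (start : String) (goal : String) (limit : Int) (out : Int) : Prop := out = sphinx_swap_alt start goal limit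
instance (start : String) (goal : String) (limit : Int) (out : Int) : Decidable (Spec_sphinx_swap start goal limit out) := by unfold Spec_sphinx_swap; infer_instance

-- ===== CLAIM (what is proved, stated in full; the proofs are below) =====
def Claim_equal_sphinx_swap : Prop := ∀ (start : String) (goal : String) (limit : Int), Dom_sphinx_swap start goal limit → Spec_sphinx_swap start goal limit (sphinx_swap start goal limit)

-- ===== LEMMAS AND PROOFS =====

theorem sphinxMismatches_nonneg (s g : List Char) : 0 ≤ sphinxMismatches s g := by
  simp [sphinxMismatches]

theorem sphinxMismatches_eq_zero_of_eq (s : List Char) : sphinxMismatches s s = 0 := by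
  induction s with
  | nil => simp [sphinxMismatches]
  | cons a t ih => simp [sphinxMismatches, List.zip] at ih ⊢

theorem sphinxAux_eq (s g : List Char) (limit : Int) (h : 0 ≤ limit) :
    sphinxAux s g limit =
      if sphinxMismatches s g > limit then limit + 1
      else sphinxMismatches s g + |((s.length : Int) - (g.length : Int))| := by
  induction s generalizing g limit with
  | nil =>
    have hm : sphinxMismatches [] g = 0 := by simp [sphinxMismatches]
    rw [sphinxAux]
    cases g with
    | nil => simp [hm]; omega
    | cons b g' =>
      have : ¬ (limit < 0 ∨ ([] : List Char) = b :: g') := by simp; omega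
      rw [if_neg this, hm]
      rw [if_neg (by omega)]
      rw [abs_sub_comm]
      simp
  | cons a s' ih =>
    cases g with
    | nil =>
      have hm : sphinxMismatches (a :: s') [] = 0 := by simp [sphinxMismatches]
      rw [sphinxAux]
      have : ¬ (limit < 0 ∨ a :: s' = ([] : List Char)) := by simp; omega
      rw [if_neg this, hm, if_neg (by omega)]
      · rw [abs_sub_comm]; simp
      · simp
    | cons b g' =>
      rw [sphinxAux]
      by_cases heq : a :: s' = b :: g'
      · rw [if_pos (Or.inr heq)]
        rw [heq, sphinxMismatches_eq_zero_of_eq]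
        rw [if_neg (by omega)]
        simp
      · rw [if_neg (by simp [heq]; omega)]
        by_cases hab : a = b
        · have hm : sphinxMismatches (a :: s') (b :: g') = sphinxMismatches s' g' := by
            simp [sphinxMismatches, List.zip, hab]
          rw [if_pos hab, hm, ih g' limit h]
          simp
        · have hm : sphinxMismatches (a :: s') (b :: g') = 1 + sphinxMismatches s' g' := by
            simp [sphinxMismatches, List.zip, hab]
            omega
          rw [if_neg hab]
          by_cases hl : 0 ≤ limit - 1
          · rw [ih g' (limit - 1) hl, hm]
            have := sphinxMismatches_nonneg s' g'
            by_cases hc : sphinxMismatches s' g' > limit - 1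
            · rw [if_pos hc, if_pos (by omega)]; ring
            · rw [if_neg hc, if_neg (by omega)]
              simp; ring
          · have hl0 : limit = 0 := by omega
            have : sphinxAux s' g' (limit - 1) = 0 := by
              rw [sphinxAux.eq_def]; rw [if_pos (Or.inl (by omega))]
            rw [this, hm]
            have := sphinxMismatches_nonneg s' g'
            rw [if_pos (by omega)]
            omega

-- ===== VERDICT (by name: the statement is the Claim_ definition above) =====
theorem sphinx_swap_spec : Claim_equal_sphinx_swap := by
  intro start goal limit _
  unfold Spec_sphinx_swap sphinx_swap sphinx_swap_alt
  by_cases h : limit < 0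
  · rw [sphinxAux.eq_def, if_pos (Or.inl h), if_pos h]
  · rw [if_neg h, sphinxAux_eq _ _ _ (by omega)]
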